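-- pv_equiv track=rewrite | github.com/wolfgangmuender/AdventOfCode | 2023/aoc01.py | solve
-- ===== SOURCE A (Python) =====
-- NUMBERS = {
--     "one": "1", "two": "2", "three": "3", "four": "4", "five": "5", "six": "6", "seven": "7", "eight": "8", "nine": "9"
-- }
--
-- def solve(puzzle_input):
--     digits1 = []
--     digits2 = []
--
--     for line in puzzle_input:
--         res1 = {}
--         res2 = {}
--
--         i = 0
--         for c in line:
--             if c.isdigit():
--                 res1[i] = c
--                 res2[i] = c
--             i += 1
--
--         for number in NUMBERS.keys():
--             i = line.find(number)
--             if i >= 0: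
--                 res2[i] = NUMBERS[number]
--             i = line.rfind(number)
--             if i >= 0:
--                 res2[i] = NUMBERS[number]
--
--         if res1:
--             digits1.append(int(res1[min(res1.keys())] + res1[max(res1.keys())]))
--         digits2.append(int(res2[min(res2.keys())] + res2[max(res2.keys())]))
--
--     return sum(digits1), sum(digits2)
-- ===== SOURCE B (Python) =====
-- WORDS = [
--     ("one", 1), ("two", 2), ("three", 3), ("four", 4), ("five", 5),
--     ("six", 6), ("seven", 7), ("eight", 8), ("nine", 9),
-- ]
--
-- def solve(puzzle_input):
--     total1 = 0
--     total2 = 0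
--     for line in puzzle_input:
--         found1 = []
--         found2 = []
--         for i in range(len(line)):
--             c = line[i]
--             if c.isdigit():
--                 found1.append(int(c))
--                 found2.append(int(c))
--             else:
--                 for word, value in WORDS:
--                     if line.startswith(word, i):
--                         found2.append(value)
--                         break
--         if found1:
--             total1 += 10 * found1[0] + found1[-1]
--         total2 += 10 * found2[0] + found2[-1]
--     return total1, total2
-- ===== Notes on version B (the rewrite author's own statement) =====
-- stated objective: alternative
-- what changed: A builds per-line position-keyed dicts from a digit pass plus find/rfind passes for each spelled word and then takes min/max keys; B does a single left-to-right scan per line collecting match values in position order (digits, plus first spelled word starting at each position), so the first/last collected values are the answer and no dict, find/rfind or min/max is needed.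
import Mathlib
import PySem

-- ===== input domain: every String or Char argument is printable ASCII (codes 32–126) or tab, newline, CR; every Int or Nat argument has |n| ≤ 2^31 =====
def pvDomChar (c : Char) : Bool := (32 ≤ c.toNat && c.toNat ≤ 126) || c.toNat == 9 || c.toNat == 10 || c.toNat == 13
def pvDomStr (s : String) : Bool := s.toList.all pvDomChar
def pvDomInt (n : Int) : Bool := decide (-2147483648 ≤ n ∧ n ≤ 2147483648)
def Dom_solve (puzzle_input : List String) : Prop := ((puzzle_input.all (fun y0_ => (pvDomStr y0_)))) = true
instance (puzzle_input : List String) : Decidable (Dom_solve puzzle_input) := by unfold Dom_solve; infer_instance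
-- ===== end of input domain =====

-- B replaces A's per-line dicts + find/rfind + min/max machinery by one left-to-right scan
-- collecting match values in position order (objective: alternative decomposition, same cost).

-- ===== PORT A =====
-- Strings are handled on their .toList side throughout (PySem convention).
def pvNUMBERS : PySem.Dict (List Char) (List Char) :=
  PySem.Dict.ofList
    [("one".toList, "1".toList), ("two".toList, "2".toList), ("three".toList, "3".toList),
     ("four".toList, "4".toList), ("five".toList, "5".toList), ("six".toList, "6".toList),
     ("seven".toList, "7".toList), ("eight".toList, "8".toList), ("nine".toList, "9".toList)]

def solve (puzzle_input : List String) : Int × Int :=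
  let dd := puzzle_input.foldl
    (fun (acc : List Int × List Int) line =>
      let cs := line.toList
      -- i = 0; for c in line: if c.isdigit(): res1[i] = c; res2[i] = c;; i += 1
      let st := cs.foldl
        (fun (st : PySem.Dict Int (List Char) × PySem.Dict Int (List Char) × Int) c =>
          if PySem.Chars.isdigit c then (st.1.insert st.2.2 [c], st.2.1.insert st.2.2 [c], st.2.2 + 1)
          else (st.1, st.2.1, st.2.2 + 1))
        (PySem.Dict.empty, PySem.Dict.empty, 0)
      let res1 := st.1
      -- for number in NUMBERS.keys(): i = line.find(number) …; i = line.rfind(number) …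
      let res2 := pvNUMBERS.keys.foldl
        (fun (res2 : PySem.Dict Int (List Char)) number =>
          let i1 := PySem.Chars.find cs number
          let res2 := if 0 ≤ i1 then res2.insert i1 (pvNUMBERS.getD number []) else res2
          let i2 := PySem.Chars.rfind cs number
          if 0 ≤ i2 then res2.insert i2 (pvNUMBERS.getD number []) else res2)
        st.2.1
      -- if res1: digits1.append(int(res1[min(res1.keys())] + res1[max(res1.keys())]))
      -- the `.getD 0/[]` defaults are only reached where Python raises (excluded by Pre_)
      let digits1 :=
        if res1.items ≠ [] then
          acc.1 ++ [(PySem.Int.ofChars?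
            (res1.getD ((PySem.List.min? res1.keys (fun k => k)).getD 0) [] ++
             res1.getD ((PySem.List.max? res1.keys (fun k => k)).getD 0) [])).getD 0]
        else acc.1
      let digits2 :=
        acc.2 ++ [(PySem.Int.ofChars?
          (res2.getD ((PySem.List.min? res2.keys (fun k => k)).getD 0) [] ++
           res2.getD ((PySem.List.max? res2.keys (fun k => k)).getD 0) [])).getD 0]
      (digits1, digits2))
    ([], [])
  (dd.1.sum, dd.2.sum)

-- ===== PORT B =====
def pvWORDS : List (List Char × Int) :=
  [("one".toList, 1), ("two".toList, 2), ("three".toList, 3), ("four".toList, 4),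
   ("five".toList, 5), ("six".toList, 6), ("seven".toList, 7), ("eight".toList, 8),
   ("nine".toList, 9)]

def solve_alt (puzzle_input : List String) : Int × Int :=
  puzzle_input.foldl
    (fun (t : Int × Int) line =>
      let cs := line.toList
      -- for i, c in enumerate(line): …  (line.startswith(word, i) with 0 ≤ i is exactly
      -- "word is a prefix of line[i:]", i.e. PySem.Chars.startswith of the dropped list)
      let fs := (PySem.List.enumerate cs).foldl
        (fun (fs : List Int × List Int) ic =>
          if PySem.Chars.isdigit ic.2 then
            (fs.1 ++ [(PySem.Int.ofChars? [ic.2]).getD 0],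
             fs.2 ++ [(PySem.Int.ofChars? [ic.2]).getD 0])
          else
            match pvWORDS.find? (fun wv => PySem.Chars.startswith (cs.drop ic.1.toNat) wv.1) with
            | some wv => (fs.1, fs.2 ++ [wv.2])
            | none => (fs.1, fs.2))
        ([], [])
      -- if found1: total1 += 10*found1[0] + found1[-1];  total2 += 10*found2[0] + found2[-1]
      -- the `.getD 0` defaults are only reached where Python raises (excluded by Pre_)
      let t1 := if fs.1 ≠ [] then
          t.1 + 10 * (PySem.List.pyGet? fs.1 0).getD 0 + (PySem.List.pyGet? fs.1 (-1)).getD 0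
        else t.1
      let t2 := t.2 + 10 * (PySem.List.pyGet? fs.2 0).getD 0 + (PySem.List.pyGet? fs.2 (-1)).getD 0
      (t1, t2))
    (0, 0)

-- ===== PRECONDITION & SPEC =====
-- Pre_ excludes inputs containing a line with neither a decimal digit nor a spelled digit word:
-- there Python A raises ValueError (min of an empty dict-key view) and Python B raises IndexError.
def Pre_solve (puzzle_input : List String) : Prop :=
  ∀ line ∈ puzzle_input,
    (line.toList.any PySem.Chars.isdigit
      || ["one", "two", "three", "four", "five", "six", "seven", "eight", "nine"].any
           (fun w => PySem.Chars.isIn w.toList line.toList)) = true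
instance (puzzle_input : List String) : Decidable (Pre_solve puzzle_input) := by
  unfold Pre_solve; infer_instance
def pvWitness_solve : List String := ["a1b2", "eightwo3"]

def Spec_solve (puzzle_input : List String) (out : Int × Int) : Prop := out = solve_alt puzzle_input
instance (puzzle_input : List String) (out : Int × Int) : Decidable (Spec_solve puzzle_input out) := by
  unfold Spec_solve; infer_instance

-- ===== CLAIM (what is proved, stated in full; the proofs are below) =====
def Claim_equal_solve : Prop := ∀ (puzzle_input : List String), Dom_solve puzzle_input → Pre_solve puzzle_input → Spec_solve puzzle_input (solve puzzle_input)

-- ===== LEMMAS AND PROOFS =====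

-- the canonical one-character spelling of a digit value m (0 ≤ m ≤ 9)
def pvDChars (m : Int) : List Char := [Char.ofNat (48 + m.toNat)]

-- the value matched at position i of cs: a digit there, else the first spelled word starting there
def pvWordAt (cs : List Char) (i : Nat) : Option Int :=
  (pvWORDS.find? (fun wv => wv.1.isPrefixOf (cs.drop i))).map (fun wv => wv.2)

def pvMatchAt (cs : List Char) (i : Nat) : Option Int :=
  if PySem.Chars.isdigit (cs.getD i ' ') then some ((cs.getD i ' ').toNat - 48 : Int)
  else pvWordAt cs i

-- positions of cs carrying a match, in increasing order
def pvIdx (cs : List Char) : List Nat :=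
  (List.range cs.length).filter (fun i => (pvMatchAt cs i).isSome)

-- the (position, one-char-string) pairs A's digit loop appends, starting at counter k
def pvDps : List Char → Int → List (Int × List Char)
  | [], _ => []
  | c :: t, k => if PySem.Chars.isdigit c then (k, [c]) :: pvDps t (k + 1) else pvDps t (k + 1)

theorem pv_isdigit_bounds (c : Char) (h : PySem.Chars.isdigit c = true) :
    48 ≤ c.toNat ∧ c.toNat ≤ 57 := by
  simp only [PySem.Chars.isdigit, Bool.and_eq_true, decide_eq_true_eq] at h
  obtain ⟨h1, h2⟩ := h
  rw [Char.le_def, UInt32.le_iff_toNat_le] at h1 h2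
  exact ⟨h1, h2⟩

theorem pv_digit_cases (c : Char) (h : PySem.Chars.isdigit c = true) :
    c = '0' ∨ c = '1' ∨ c = '2' ∨ c = '3' ∨ c = '4' ∨ c = '5' ∨ c = '6' ∨ c = '7' ∨ c = '8' ∨
      c = '9' := by
  obtain ⟨h1, h2⟩ := pv_isdigit_bounds c h
  have hc := Char.ofNat_toNat c
  have : c.toNat = 48 ∨ c.toNat = 49 ∨ c.toNat = 50 ∨ c.toNat = 51 ∨ c.toNat = 52 ∨
      c.toNat = 53 ∨ c.toNat = 54 ∨ c.toNat = 55 ∨ c.toNat = 56 ∨ c.toNat = 57 := by omega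
  rcases this with h'|h'|h'|h'|h'|h'|h'|h'|h'|h' <;> rw [← hc, h'] <;> simp

theorem pv_digit_val (c : Char) (h : PySem.Chars.isdigit c = true) :
    PySem.Int.ofChars? [c] = some ((c.toNat : Int) - 48) := by
  rcases pv_digit_cases c h with h'|h'|h'|h'|h'|h'|h'|h'|h'|h' <;> subst h' <;> decide

theorem pv_two_digit_val (a b : Int) (ha : 0 ≤ a ∧ a ≤ 9) (hb : 0 ≤ b ∧ b ≤ 9) :
    PySem.Int.ofChars? (pvDChars a ++ pvDChars b) = some (10 * a + b) := by
  obtain ⟨ha0, ha9⟩ := ha; obtain ⟨hb0, hb9⟩ := hb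
  interval_cases a <;> interval_cases b <;> decide

theorem pv_dchars_digit (c : Char) (h : PySem.Chars.isdigit c = true) :
    pvDChars ((c.toNat : Int) - 48) = [c] := by
  rcases pv_digit_cases c h with h'|h'|h'|h'|h'|h'|h'|h'|h'|h' <;> subst h' <;> decide

theorem pv_words_val_range : ∀ wv ∈ pvWORDS, 0 ≤ wv.2 ∧ wv.2 ≤ 9 := by decide

theorem pv_matchAt_range (cs : List Char) (a : Int) (i : Nat) (h : pvMatchAt cs i = some a) :
    0 ≤ a ∧ a ≤ 9 := by
  unfold pvMatchAt at h
  split at h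
  · rename_i hd
    obtain ⟨h1, h2⟩ := pv_isdigit_bounds _ hd
    injection h with h; omega
  · unfold pvWordAt at h
    rcases hf : pvWORDS.find? (fun wv => wv.1.isPrefixOf (cs.drop i)) with _ | wv
    · rw [hf] at h; simp at h
    · rw [hf] at h; simp at h
      have := pv_words_val_range wv (List.mem_of_find?_eq_some hf)
      omega

theorem pv_words_ne_nil : ∀ wv ∈ pvWORDS, wv.1 ≠ [] := by decide

theorem pv_matchAt_lt_length (cs : List Char) (i : Nat) (h : (pvMatchAt cs i).isSome) :
    i < cs.length := by
  by_contra hlen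
  push_neg at hlen
  unfold pvMatchAt at h
  rw [List.getD_eq_default _ _ hlen] at h
  simp only [show PySem.Chars.isdigit ' ' = false by decide, Bool.false_eq_true, if_false] at h
  unfold pvWordAt at h
  rcases hf : pvWORDS.find? (fun wv => wv.1.isPrefixOf (cs.drop i)) with _ | wv
  · rw [hf] at h; simp at h
  · have hp := List.find?_some hf
    simp only [List.isPrefixOf_iff_prefix] at hp
    rw [List.drop_eq_nil_of_le hlen, List.prefix_nil] at hp
    exact pv_words_ne_nil wv (List.mem_of_find?_eq_some hf) hp

theorem pv_words_prefix_antisymm : ∀ u ∈ pvWORDS, ∀ v ∈ pvWORDS, u.1 <+: v.1 → u = v := by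
  decide

theorem pv_word_unique {u v : List Char × Int} (hu : u ∈ pvWORDS) (hv : v ∈ pvWORDS)
    {l : List Char} (h1 : u.1 <+: l) (h2 : v.1 <+: l) : u = v := by
  rcases List.prefix_or_prefix_of_prefix h1 h2 with h | h
  · exact pv_words_prefix_antisymm u hu v hv h
  · exact (pv_words_prefix_antisymm v hv u hu h).symm

theorem pv_wordAt_of_prefix {wv : List Char × Int} (hw : wv ∈ pvWORDS) (cs : List Char) (i : Nat)
    (h : wv.1 <+: cs.drop i) : pvWordAt cs i = some wv.2 := by
  unfold pvWordAt
  rcases hf : pvWORDS.find? (fun wv => wv.1.isPrefixOf (cs.drop i)) with _ | u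
  · rw [List.find?_eq_none] at hf
    exact absurd (List.isPrefixOf_iff_prefix.mpr h) (hf wv hw)
  · have hp := List.find?_some hf
    simp only [List.isPrefixOf_iff_prefix] at hp
    have := pv_word_unique (List.mem_of_find?_eq_some hf) hw hp h
    subst this; rw [hf]; rfl

theorem pv_words_head_not_digit :
    ∀ wv ∈ pvWORDS, PySem.Chars.isdigit (wv.1.headD ' ') = false := by decide

theorem pv_matchAt_of_prefix {wv : List Char × Int} (hw : wv ∈ pvWORDS) (cs : List Char) (i : Nat)
    (h : wv.1 <+: cs.drop i) : pvMatchAt cs i = some wv.2 := by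
  have hnd : PySem.Chars.isdigit (cs.getD i ' ') = false := by
    rcases hw1 : wv.1 with _ | ⟨c, t⟩
    · exact absurd hw1 (pv_words_ne_nil wv hw)
    · have hh : (cs.drop i).head? = some c := by
        rw [hw1] at h
        rcases h with ⟨r, hr⟩
        rw [← hr]; rfl
      rw [List.head?_drop] at hh
      have : cs.getD i ' ' = c := by
        rw [List.getD_eq_getElem?_getD, hh]; rfl
      rw [this]
      have := pv_words_head_not_digit wv hw
      rwa [hw1] at this
  unfold pvMatchAt
  rw [hnd]
  simp only [Bool.false_eq_true, if_false]
  exact pv_wordAt_of_prefix hw cs i h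

theorem pv_rfind_go_spec (s sub : List Char) (k : Nat) :
    (0 ≤ PySem.Chars.rfind.go s sub k →
      sub <+: s.drop (PySem.Chars.rfind.go s sub k).toNat ∧
        (PySem.Chars.rfind.go s sub k).toNat ≤ k) ∧
      ∀ j : Nat, j ≤ k → sub <+: s.drop j → (j : Int) ≤ PySem.Chars.rfind.go s sub k := by
  induction k with
  | zero =>
    constructor
    · intro h0
      by_cases hp : sub.isPrefixOf s = true
      · simp [PySem.Chars.rfind.go, hp]
        exact List.isPrefixOf_iff_prefix.mp hp
      · simp [PySem.Chars.rfind.go, hp] at h0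
    · intro j hj hpre
      interval_cases j
      simp only [List.drop_zero] at hpre
      simp [PySem.Chars.rfind.go, List.isPrefixOf_iff_prefix.mpr hpre]
  | succ k ih =>
    have hgo : PySem.Chars.rfind.go s sub (k + 1) =
        if sub.isPrefixOf (List.drop (k + 1) s) = true then ((k : Int) + 1)
        else PySem.Chars.rfind.go s sub k := by
      simp [PySem.Chars.rfind.go]
    constructor
    · intro h0
      rw [hgo] at h0 ⊢
      by_cases hp : sub.isPrefixOf (List.drop (k + 1) s) = true
      · simp only [hp, if_true] at h0 ⊢
        constructor
        · have : ((k : Int) + 1).toNat = k + 1 := by omega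
          rw [this]
          exact List.isPrefixOf_iff_prefix.mp hp
        · omega
      · simp only [hp, Bool.false_eq_true, if_false] at h0 ⊢
        exact ⟨(ih.1 h0).1, Nat.le_succ_of_le (ih.1 h0).2⟩
    · intro j hj hpre
      rw [hgo]
      by_cases hp : sub.isPrefixOf (List.drop (k + 1) s) = true
      · simp only [hp, if_true]; omega
      · simp only [hp, Bool.false_eq_true, if_false]
        rcases Nat.lt_or_ge j (k + 1) with hj' | hj'
        · exact ih.2 j (by omega) hpre
        · have : j = k + 1 := by omega
          subst this
          exact absurd (List.isPrefixOf_iff_prefix.mpr hpre) (by simpa using hp)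

theorem pv_rfind_spec (s sub : List Char) (h : 0 ≤ PySem.Chars.rfind s sub) :
    sub <+: s.drop (PySem.Chars.rfind s sub).toNat ∧
      (PySem.Chars.rfind s sub).toNat ≤ s.length ∧
      ∀ j : Nat, j ≤ s.length → sub <+: s.drop j → (j : Int) ≤ PySem.Chars.rfind s sub := by
  have hs := pv_rfind_go_spec s sub s.length
  exact ⟨(hs.1 h).1, (hs.1 h).2, hs.2⟩

theorem pv_find_facts (s sub : List Char) (j : Nat) (hpre : sub <+: s.drop j)
    (hne : sub ≠ []) :
    0 ≤ PySem.Chars.find s sub ∧ (PySem.Chars.find s sub).toNat ≤ j ∧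
      sub <+: s.drop (PySem.Chars.find s sub).toNat := by
  have hinf : sub <:+: s := hpre.isInfix.trans (List.drop_suffix j s).isInfix
  have h0 : 0 ≤ PySem.Chars.find s sub := (PySem.Chars.find_nonneg_iff s sub).mpr hinf
  obtain ⟨hat, hmin⟩ := PySem.Chars.find_spec h0
  refine ⟨h0, ?_, hat⟩
  by_contra hlt
  push_neg at hlt
  exact hmin j hlt hpre


-- value at a match position / at a digit position
def pvVal (cs : List Char) (i : Nat) : Int := (pvMatchAt cs i).getD 0

def pvDVal (cs : List Char) (i : Nat) : Int := ((cs.getD i ' ').toNat : Int) - 48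

-- digit positions of cs, in increasing order
def pvIdxD (cs : List Char) : List Nat :=
  (List.range cs.length).filter (fun i => PySem.Chars.isdigit (cs.getD i ' '))

-- per-line results both programs compute
def pvA1L (cs : List Char) : List Int :=
  if pvIdxD cs ≠ [] then
    [10 * pvDVal cs ((pvIdxD cs).headD 0) + pvDVal cs ((pvIdxD cs).getLastD 0)]
  else []

def pvA2 (cs : List Char) : Int :=
  10 * pvVal cs ((pvIdx cs).headD 0) + pvVal cs ((pvIdx cs).getLastD 0)

-- B's inner scan produces the match values in position order
theorem pv_bscan_go (cs : List Char) (l : List Nat) (a b : List Int) :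
    l.foldl
      (fun (fs : List Int × List Int) (i : Nat) =>
        if PySem.Chars.isdigit (cs.getD i ' ') then
          (fs.1 ++ [(PySem.Int.ofChars? [cs.getD i ' ']).getD 0],
           fs.2 ++ [(PySem.Int.ofChars? [cs.getD i ' ']).getD 0])
        else
          match pvWORDS.find? (fun wv => wv.1.isPrefixOf (cs.drop i)) with
          | some wv => (fs.1, fs.2 ++ [wv.2])
          | none => (fs.1, fs.2))
      (a, b) =
    (a ++ (l.filter (fun i => PySem.Chars.isdigit (cs.getD i ' '))).map (fun i => pvDVal cs i),
     b ++ (l.filter (fun i => (pvMatchAt cs i).isSome)).map (fun i => pvVal cs i)) := by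
  induction l generalizing a b with
  | nil => simp
  | cons i t ih =>
    simp only [List.foldl_cons]
    by_cases hd : PySem.Chars.isdigit (cs.getD i ' ') = true
    · have hm : pvMatchAt cs i = some (pvDVal cs i) := by
        unfold pvMatchAt pvDVal
        rw [hd]
        simp
      have hv : (PySem.Int.ofChars? [cs.getD i ' ']).getD 0 = pvDVal cs i := by
        rw [pv_digit_val _ hd]
        rfl
      simp only [hd, if_true, hv, ih, List.filter_cons]
      simp only [hd, if_true, hm, Option.isSome_some, List.map_cons]
      simp only [pvVal, hm, Option.getD_some]
      simp [List.append_assoc]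
    · simp only [Bool.not_eq_true] at hd
      have hw : pvMatchAt cs i = pvWordAt cs i := by
        unfold pvMatchAt
        rw [hd]
        simp
      rcases hf : pvWORDS.find? (fun wv => wv.1.isPrefixOf (cs.drop i)) with _ | wv
      · have hm : pvMatchAt cs i = none := by
          rw [hw]; unfold pvWordAt; rw [hf]; rfl
        simp only [hd, Bool.false_eq_true, if_false, hf, ih, List.filter_cons]
        simp only [hd, hm, Option.isSome_none, Bool.false_eq_true, if_false]
      · have hm : pvMatchAt cs i = some wv.2 := by
          rw [hw]; unfold pvWordAt; rw [hf]; rfl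
        simp only [hd, Bool.false_eq_true, if_false, hf, ih, List.filter_cons]
        simp only [hd, hm, Option.isSome_some, Bool.false_eq_true, if_false, if_true,
          List.map_cons]
        simp only [pvVal, hm, Option.getD_some]
        simp [List.append_assoc]

theorem pv_bscan (cs : List Char) (a b : List Int) :
    (PySem.List.enumerate cs).foldl
      (fun (fs : List Int × List Int) ic =>
        if PySem.Chars.isdigit ic.2 then
          (fs.1 ++ [(PySem.Int.ofChars? [ic.2]).getD 0],
           fs.2 ++ [(PySem.Int.ofChars? [ic.2]).getD 0])
        else
          match pvWORDS.find? (fun wv => PySem.Chars.startswith (cs.drop ic.1.toNat) wv.1) with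
          | some wv => (fs.1, fs.2 ++ [wv.2])
          | none => (fs.1, fs.2))
      (a, b) =
    (a ++ (pvIdxD cs).map (fun i => pvDVal cs i), b ++ (pvIdx cs).map (fun i => pvVal cs i)) := by
  rw [PySem.List.enumerate_eq_map_pyRange cs ' ',
    show PySem.List.len cs = ((cs.length : Nat) : Int) from rfl,
    PySem.List.pyRange_zero_natCast, List.map_map, List.foldl_map]
  simp only [Function.comp_apply, PySem.List.pyGetD_natCast, Int.toNat_natCast,
    PySem.Chars.startswith]
  exact pv_bscan_go cs (List.range cs.length) a b

-- A's digit loop builds exactly the dict of digit positions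
theorem pv_digit_fold (cs : List Char) (d1 d2 : PySem.Dict Int (List Char)) (k : Int)
    (h1 : ∀ j ∈ d1.keys, j < k) (h2 : ∀ j ∈ d2.keys, j < k) :
    cs.foldl
      (fun (st : PySem.Dict Int (List Char) × PySem.Dict Int (List Char) × Int) c =>
        if PySem.Chars.isdigit c then (st.1.insert st.2.2 [c], st.2.1.insert st.2.2 [c], st.2.2 + 1)
        else (st.1, st.2.1, st.2.2 + 1))
      (d1, d2, k) =
    (⟨d1.items ++ pvDps cs k⟩, ⟨d2.items ++ pvDps cs k⟩, k + cs.length) := by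
  induction cs generalizing d1 d2 k with
  | nil => simp [pvDps]
  | cons c t ih =>
    have fresh : ∀ (d : PySem.Dict Int (List Char)), (∀ j ∈ d.keys, j < k) →
        d.contains k = false := by
      intro d hd
      rcases hcon : d.contains k with _ | _
      · rfl
      · have := (PySem.Dict.contains_iff_mem_keys d k).mp hcon
        have := hd k this
        omega
    by_cases hc : PySem.Chars.isdigit c = true
    · simp only [List.foldl_cons, hc, if_true]
      have hk1 : ∀ j ∈ (d1.insert k [c]).keys, j < k + 1 := by
        rw [PySem.Dict.keys_insert_of_not_contains d1 [c] (fresh d1 h1)]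
        intro j hj
        rcases List.mem_append.mp hj with hj | hj
        · have := h1 j hj; omega
        · simp at hj; omega
      have hk2 : ∀ j ∈ (d2.insert k [c]).keys, j < k + 1 := by
        rw [PySem.Dict.keys_insert_of_not_contains d2 [c] (fresh d2 h2)]
        intro j hj
        rcases List.mem_append.mp hj with hj | hj
        · have := h2 j hj; omega
        · simp at hj; omega
      rw [ih (d1.insert k [c]) (d2.insert k [c]) (k + 1) hk1 hk2]
      simp only [pvDps, hc, if_true]
      rw [PySem.Dict.items_insert_of_not_contains d1 [c] (fresh d1 h1),
        PySem.Dict.items_insert_of_not_contains d2 [c] (fresh d2 h2)]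
      simp only [List.append_assoc, List.singleton_append, List.length_cons,
        Prod.mk.injEq, PySem.Dict.mk.injEq]
      refine ⟨trivial, trivial, by push_cast; ring⟩
    · simp only [Bool.not_eq_true] at hc
      simp only [List.foldl_cons, hc, Bool.false_eq_true, if_false]
      rw [ih d1 d2 (k + 1) (fun j hj => by have := h1 j hj; omega)
        (fun j hj => by have := h2 j hj; omega)]
      simp only [pvDps, hc, Bool.false_eq_true, if_false, List.length_cons, Prod.mk.injEq,
        PySem.Dict.mk.injEq]
      refine ⟨trivial, trivial, by push_cast; ring⟩

theorem pv_dps_eq_map (cs : List Char) (k : Int) :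
    pvDps cs k = (pvIdxD cs).map (fun (i : Nat) => (k + (i : Int), [cs.getD i ' '])) := by
  induction cs generalizing k with
  | nil => simp [pvDps, pvIdxD]
  | cons c t ih =>
    have hidx : pvIdxD (c :: t) =
        (if PySem.Chars.isdigit c then [0] else []) ++ (pvIdxD t).map Nat.succ := by
      unfold pvIdxD
      rw [show (c :: t).length = t.length + 1 from rfl, List.range_succ_eq_map,
        List.filter_cons, List.filter_map]
      have hfc : List.filter ((fun i => PySem.Chars.isdigit ((c :: t).getD i ' ')) ∘ Nat.succ)
          (List.range t.length) =
          List.filter (fun i => PySem.Chars.isdigit (t.getD i ' ')) (List.range t.length) :=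
        List.filter_congr (fun i _ => rfl)
      rw [hfc]
      by_cases hc : PySem.Chars.isdigit c = true
      · simp only [List.getD_cons_zero, hc, if_true, List.singleton_append]
      · simp only [List.getD_cons_zero, Bool.not_eq_true] at hc ⊢
        rw [hc]
        simp only [Bool.false_eq_true, if_false, List.nil_append]
    rw [hidx]
    by_cases hc : PySem.Chars.isdigit c = true
    · simp only [hc, if_true, List.singleton_append, List.map_cons, List.map_map]
      simp only [pvDps, hc, if_true, ih (k + 1), List.map_map]
      simp only [Prod.mk.injEq, List.cons.injEq]
      refine ⟨⟨by simp, by simp⟩, ?_⟩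
      apply List.map_congr_left
      intro i _
      simp only [Function.comp_apply, Prod.mk.injEq]
      refine ⟨by push_cast; ring, rfl⟩
    · simp only [Bool.not_eq_true] at hc
      simp only [pvDps, hc, Bool.false_eq_true, if_false, List.nil_append, ih (k + 1),
        List.map_map, List.map_cons]
      apply List.map_congr_left
      intro i _
      simp only [Function.comp_apply, Prod.mk.injEq]
      refine ⟨by push_cast; ring, rfl⟩

-- sorted-position-list facts
theorem pv_headD_mem {l : List Nat} (h : l ≠ []) : l.headD 0 ∈ l := by
  cases l with
  | nil => exact absurd rfl h
  | cons x t => exact List.mem_cons_self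

theorem pv_getLastD_mem {l : List Nat} (h : l ≠ []) : l.getLastD 0 ∈ l := by
  cases l with
  | nil => exact absurd rfl h
  | cons x t =>
    rw [List.getLastD_eq_getLast?, List.getLast?_eq_some_getLast (by simp)]
    exact List.getLast_mem _

theorem pv_head_min {l : List Nat} (hs : l.Pairwise (· < ·)) : ∀ x ∈ l, l.headD 0 ≤ x := by
  cases l with
  | nil => intro x hx; cases hx
  | cons y t =>
    intro x hx
    rcases List.mem_cons.mp hx with h | h
    · subst h; simp
    · have := (List.pairwise_cons.mp hs).1 x h; simp; omega

theorem pv_last_max {l : List Nat} (hs : l.Pairwise (· < ·)) : ∀ x ∈ l, x ≤ l.getLastD 0 := by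
  induction l with
  | nil => intro x hx; cases hx
  | cons y t ih =>
    intro x hx
    cases t with
    | nil => simp at hx; simp [hx]
    | cons z t' =>
      have hs' := List.pairwise_cons.mp hs
      rcases List.mem_cons.mp hx with h | h
      · subst h
        have h1 : x < z := hs'.1 z List.mem_cons_self
        have h2 := ih hs'.2 z List.mem_cons_self
        simpa using (by omega : x ≤ (z :: t').getLastD 0)
      · simpa using ih hs'.2 x h

theorem pv_idx_pairwise (cs : List Char) : (pvIdx cs).Pairwise (· < ·) :=
  List.pairwise_lt_range.filter _

theorem pv_idxD_pairwise (cs : List Char) : (pvIdxD cs).Pairwise (· < ·) :=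
  List.pairwise_lt_range.filter _

theorem pv_mem_idx (cs : List Char) (i : Nat) :
    i ∈ pvIdx cs ↔ (pvMatchAt cs i).isSome := by
  constructor
  · intro h
    exact (List.mem_filter.mp h).2
  · intro h
    exact List.mem_filter.mpr ⟨List.mem_range.mpr (pv_matchAt_lt_length cs i h), h⟩

theorem pv_mem_idxD (cs : List Char) (i : Nat) :
    i ∈ pvIdxD cs ↔ PySem.Chars.isdigit (cs.getD i ' ') = true := by
  constructor
  · intro h
    exact (List.mem_filter.mp h).2
  · intro h
    refine List.mem_filter.mpr ⟨List.mem_range.mpr ?_, h⟩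
    by_contra hlen
    rw [List.getD_eq_default _ _ (by omega)] at h
    exact absurd h (by decide)

-- pyGet? at 0 / -1 on a nonempty list
theorem pv_pyGet_zero {α : Type} (l : List α) (h : l ≠ []) :
    PySem.List.pyGet? l 0 = l.head? := by
  cases l with
  | nil => exact absurd rfl h
  | cons x t => simp [PySem.List.pyGet?, PySem.List.pyIdx?]

theorem pv_pyGet_neg_one {α : Type} (l : List α) (h : l ≠ []) :
    PySem.List.pyGet? l (-1) = l.getLast? := by
  cases l with
  | nil => exact absurd rfl h
  | cons x t => simp [PySem.List.pyGet?, PySem.List.pyIdx?, List.getLast?_eq_getElem?]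


theorem pv_matchAt_digit (cs : List Char) (i : Nat)
    (hd : PySem.Chars.isdigit (cs.getD i ' ') = true) :
    pvMatchAt cs i = some (pvDVal cs i) := by
  unfold pvMatchAt pvDVal
  rw [hd]
  simp

-- soundness invariant of A's res2 dict: every stored pair is a match
def pvSound (cs : List Char) (d : PySem.Dict Int (List Char)) : Prop :=
  ∀ p ∈ d.items, ∃ i : Nat, p.1 = (i : Int) ∧ ∃ m, pvMatchAt cs i = some m ∧ p.2 = pvDChars m

-- A's word-loop body with its lets inlined
def pvStepW (cs : List Char) (res2 : PySem.Dict Int (List Char)) (number : List Char) :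
    PySem.Dict Int (List Char) :=
  if 0 ≤ PySem.Chars.rfind cs number then
    (if 0 ≤ PySem.Chars.find cs number then
        res2.insert (PySem.Chars.find cs number) (pvNUMBERS.getD number [])
      else res2).insert (PySem.Chars.rfind cs number) (pvNUMBERS.getD number [])
  else
    if 0 ≤ PySem.Chars.find cs number then
      res2.insert (PySem.Chars.find cs number) (pvNUMBERS.getD number [])
    else res2

def pvRes2 (cs : List Char) : PySem.Dict Int (List Char) :=
  pvWORDS.foldl (fun d wv => pvStepW cs d wv.1) ⟨pvDps cs 0⟩

theorem pv_numbers_keys : pvNUMBERS.keys = pvWORDS.map (fun wv => wv.1) := by decide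

theorem pv_numbers_getD : ∀ wv ∈ pvWORDS, pvNUMBERS.getD wv.1 [] = pvDChars wv.2 := by decide

theorem pv_prefix_le_length {wv : List Char × Int} (hw : wv ∈ pvWORDS) {cs : List Char} {j : Nat}
    (h : wv.1 <+: cs.drop j) : j ≤ cs.length := by
  by_contra hlen
  push_neg at hlen
  rw [List.drop_eq_nil_of_le (by omega), List.prefix_nil] at h
  exact pv_words_ne_nil wv hw h

theorem pv_sound_insert (cs : List Char) {d : PySem.Dict Int (List Char)} (hs : pvSound cs d)
    {wv : List Char × Int} (hw : wv ∈ pvWORDS) {j : Int} (hj : 0 ≤ j)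
    (hpre : wv.1 <+: cs.drop j.toNat) :
    pvSound cs (d.insert j (pvNUMBERS.getD wv.1 [])) := by
  intro p hp
  rcases (PySem.Dict.mem_items_insert d j (pvNUMBERS.getD wv.1 []) p).mp hp with h | ⟨hp', _⟩
  · subst h
    refine ⟨j.toNat, by simp; omega, wv.2, pv_matchAt_of_prefix hw cs j.toNat hpre, ?_⟩
    exact pv_numbers_getD wv hw
  · exact hs p hp'

theorem pv_sound_step (cs : List Char) {d : PySem.Dict Int (List Char)} (hs : pvSound cs d)
    {wv : List Char × Int} (hw : wv ∈ pvWORDS) : pvSound cs (pvStepW cs d wv.1) := by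
  unfold pvStepW
  have hfind : pvSound cs (if 0 ≤ PySem.Chars.find cs wv.1 then
      d.insert (PySem.Chars.find cs wv.1) (pvNUMBERS.getD wv.1 []) else d) := by
    split
    · rename_i h0
      exact pv_sound_insert cs hs hw h0 (PySem.Chars.find_spec h0).1
    · exact hs
  split
  · rename_i h0
    exact pv_sound_insert cs hfind hw h0 (pv_rfind_spec cs wv.1 h0).1
  · exact hfind

theorem pv_sound_fold (cs : List Char) (l : List (List Char × Int))
    (hl : ∀ x ∈ l, x ∈ pvWORDS) {d : PySem.Dict Int (List Char)} (hs : pvSound cs d) :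
    pvSound cs (l.foldl (fun d wv => pvStepW cs d wv.1) d) := by
  induction l generalizing d with
  | nil => exact hs
  | cons wv t ih =>
    exact ih (fun x hx => hl x (List.mem_cons_of_mem wv hx))
      (pv_sound_step cs hs (hl wv List.mem_cons_self))

theorem pv_nodup_step (cs : List Char) {d : PySem.Dict Int (List Char)} (hn : d.keys.Nodup)
    (w : List Char) : (pvStepW cs d w).keys.Nodup := by
  unfold pvStepW
  have hfind : (if 0 ≤ PySem.Chars.find cs w then
      d.insert (PySem.Chars.find cs w) (pvNUMBERS.getD w []) else d).keys.Nodup := by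
    split
    · exact PySem.Dict.nodup_keys_insert d _ _ hn
    · exact hn
  split
  · exact PySem.Dict.nodup_keys_insert _ _ _ hfind
  · exact hfind

theorem pv_nodup_fold (cs : List Char) (l : List (List Char × Int))
    {d : PySem.Dict Int (List Char)} (hn : d.keys.Nodup) :
    (l.foldl (fun d wv => pvStepW cs d wv.1) d).keys.Nodup := by
  induction l generalizing d with
  | nil => exact hn
  | cons wv t ih => exact ih (pv_nodup_step cs hn wv.1)

theorem pv_contains_step (cs : List Char) {d : PySem.Dict Int (List Char)} {k : Int}
    (h : d.contains k = true) (w : List Char) : (pvStepW cs d w).contains k = true := by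
  unfold pvStepW
  have hfind : (if 0 ≤ PySem.Chars.find cs w then
      d.insert (PySem.Chars.find cs w) (pvNUMBERS.getD w []) else d).contains k = true := by
    split
    · rw [PySem.Dict.contains_insert]
      simp [h]
    · exact h
  split
  · rw [PySem.Dict.contains_insert]
    simp [hfind]
  · exact hfind

theorem pv_contains_fold (cs : List Char) (l : List (List Char × Int))
    {d : PySem.Dict Int (List Char)} {k : Int} (h : d.contains k = true) :
    (l.foldl (fun d wv => pvStepW cs d wv.1) d).contains k = true := by
  induction l generalizing d with
  | nil => exact h
  | cons wv t ih => exact ih (pv_contains_step cs h wv.1)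

theorem pv_step_contains_find (cs : List Char) (d : PySem.Dict Int (List Char)) (w : List Char)
    (h0 : 0 ≤ PySem.Chars.find cs w) :
    (pvStepW cs d w).contains (PySem.Chars.find cs w) = true := by
  unfold pvStepW
  have hfind : (if 0 ≤ PySem.Chars.find cs w then
      d.insert (PySem.Chars.find cs w) (pvNUMBERS.getD w []) else d).contains
        (PySem.Chars.find cs w) = true := by
    rw [if_pos h0]
    exact PySem.Dict.contains_insert_self d _ _
  by_cases hr : 0 ≤ PySem.Chars.rfind cs w
  · rw [if_pos hr, PySem.Dict.contains_insert]
    simp [hfind]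
  · rw [if_neg hr]
    exact hfind

theorem pv_step_contains_rfind (cs : List Char) (d : PySem.Dict Int (List Char)) (w : List Char)
    (h0 : 0 ≤ PySem.Chars.rfind cs w) :
    (pvStepW cs d w).contains (PySem.Chars.rfind cs w) = true := by
  unfold pvStepW
  rw [if_pos h0]
  exact PySem.Dict.contains_insert_self _ _ _

theorem pv_fold_contains (cs : List Char) (l : List (List Char × Int))
    {wv : List Char × Int} (hw : wv ∈ l) (d : PySem.Dict Int (List Char)) :
    (0 ≤ PySem.Chars.find cs wv.1 →
      (l.foldl (fun d wv => pvStepW cs d wv.1) d).contains (PySem.Chars.find cs wv.1) = true) ∧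
    (0 ≤ PySem.Chars.rfind cs wv.1 →
      (l.foldl (fun d wv => pvStepW cs d wv.1) d).contains (PySem.Chars.rfind cs wv.1) = true) := by
  induction l generalizing d with
  | nil => cases hw
  | cons u t ih =>
    rcases List.mem_cons.mp hw with h | h
    · subst h
      constructor
      · intro h0
        exact pv_contains_fold cs t (pv_step_contains_find cs d wv.1 h0)
      · intro h0
        exact pv_contains_fold cs t (pv_step_contains_rfind cs d wv.1 h0)
    · exact ih h _

-- base dict facts
theorem pv_base_sound (cs : List Char) : pvSound cs (⟨pvDps cs 0⟩ : PySem.Dict Int (List Char)) := by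
  intro p hp
  rw [show (⟨pvDps cs 0⟩ : PySem.Dict Int (List Char)).items = pvDps cs 0 from rfl,
    pv_dps_eq_map] at hp
  rcases List.mem_map.mp hp with ⟨i, hi, hpi⟩
  have hd := (pv_mem_idxD cs i).mp hi
  refine ⟨i, by rw [← hpi]; simp, pvDVal cs i, pv_matchAt_digit cs i hd, ?_⟩
  rw [← hpi]
  simp only [pvDVal]
  exact (pv_dchars_digit _ hd).symm

theorem pv_base_keys (cs : List Char) :
    (⟨pvDps cs 0⟩ : PySem.Dict Int (List Char)).keys = (pvIdxD cs).map (fun (i : Nat) => (i : Int)) := by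
  show (pvDps cs 0).map (fun p => p.1) = _
  rw [pv_dps_eq_map, List.map_map]
  apply List.map_congr_left
  intro i _
  simp

theorem pv_base_nodup (cs : List Char) :
    (⟨pvDps cs 0⟩ : PySem.Dict Int (List Char)).keys.Nodup := by
  rw [pv_base_keys]
  refine List.Pairwise.imp (fun {a b} h => ne_of_lt h) ?_
  rw [List.pairwise_map]
  exact (pv_idxD_pairwise cs).imp (fun h => by exact_mod_cast h)

-- generic lookup lemma on a sound dict
theorem pv_getD_sound (cs : List Char) {d : PySem.Dict Int (List Char)} (hs : pvSound cs d)
    (hn : d.keys.Nodup) {i : Nat} (hc : d.contains (i : Int) = true) :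
    d.getD (i : Int) [] = pvDChars (pvVal cs i) ∧ (pvMatchAt cs i).isSome := by
  rcases hg : d.get? (i : Int) with _ | v
  · rw [PySem.Dict.get?_eq_none_iff_contains] at hg
    rw [hg] at hc
    cases hc
  · have hmem := (PySem.Dict.get?_eq_some_iff_mem_items d _ v hn).mp hg
    rcases hs _ hmem with ⟨i', hi', m, hm, hv⟩
    simp only at hi' hv
    have : i = i' := by exact_mod_cast hi'
    subst this
    rw [PySem.Dict.getD_eq_get?_getD, hg]
    refine ⟨?_, by rw [hm]; rfl⟩
    simp [hv, pvVal, hm]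

theorem pv_keys_sub (cs : List Char) {d : PySem.Dict Int (List Char)} (hs : pvSound cs d) :
    ∀ k ∈ d.keys, ∃ i ∈ pvIdx cs, k = (i : Int) := by
  intro k hk
  rcases List.mem_map.mp hk with ⟨p, hp, hpk⟩
  rcases hs p hp with ⟨i, hi, m, hm, _⟩
  exact ⟨i, (pv_mem_idx cs i).mpr (by rw [hm]; rfl), by rw [← hpk, hi]⟩

-- generic min/max over an Int key list drawn from a sorted Nat list
theorem pv_min_keys (L : List Nat) (hL : L.Pairwise (· < ·)) (keys : List Int)
    (hsub : ∀ k ∈ keys, ∃ i ∈ L, k = (i : Int)) (hmem : ((L.headD 0 : Nat) : Int) ∈ keys) :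
    PySem.List.min? keys (fun k => k) = some ((L.headD 0 : Nat) : Int) := by
  rcases hm : PySem.List.min? keys (fun k => k) with _ | m
  · rw [PySem.List.min?_eq_none_iff] at hm
    rw [hm] at hmem
    cases hmem
  · have h1 := PySem.List.min?_isMin hm _ hmem
    rcases hsub m (PySem.List.min?_mem hm) with ⟨im, him, hmi⟩
    have h2 := pv_head_min hL im him
    simp only at h1
    subst hmi
    congr 1
    omega

theorem pv_max_keys (L : List Nat) (hL : L.Pairwise (· < ·)) (keys : List Int)
    (hsub : ∀ k ∈ keys, ∃ i ∈ L, k = (i : Int)) (hmem : ((L.getLastD 0 : Nat) : Int) ∈ keys) :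
    PySem.List.max? keys (fun k => k) = some ((L.getLastD 0 : Nat) : Int) := by
  rcases hm : PySem.List.max? keys (fun k => k) with _ | m
  · rw [PySem.List.max?_eq_none_iff] at hm
    rw [hm] at hmem
    cases hmem
  · have h1 := PySem.List.max?_isMax hm _ hmem
    rcases hsub m (PySem.List.max?_mem hm) with ⟨im, him, hmi⟩
    have h2 := pv_last_max hL im him
    simp only at h1
    subst hmi
    congr 1
    omega

-- res2 contains the first and last match positions
theorem pv_res2_contains (cs : List Char) {i : Nat} (hi : i ∈ pvIdx cs)
    (hext : (∀ x ∈ pvIdx cs, i ≤ x) ∨ (∀ x ∈ pvIdx cs, x ≤ i)) :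
    (pvRes2 cs).contains (i : Int) = true := by
  have hm := (pv_mem_idx cs i).mp hi
  unfold pvMatchAt at hm
  by_cases hd : PySem.Chars.isdigit (cs.getD i ' ') = true
  · -- digit position: present in the base dict, preserved by the word loop
    apply pv_contains_fold
    rw [PySem.Dict.contains_iff_mem_keys, pv_base_keys]
    exact List.mem_map.mpr ⟨i, (pv_mem_idxD cs i).mpr hd, rfl⟩
  · rw [Bool.not_eq_true] at hd
    rw [hd] at hm
    simp only [Bool.false_eq_true, if_false] at hm
    unfold pvWordAt at hm
    rcases hf : pvWORDS.find? (fun wv => wv.1.isPrefixOf (cs.drop i)) with _ | wv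
    · rw [hf] at hm
      cases hm
    · have hw := List.mem_of_find?_eq_some hf
      have hpb := List.find?_some hf
      simp only [List.isPrefixOf_iff_prefix] at hpb
      have hpre : wv.1 <+: cs.drop i := hpb
      rcases hext with hmin | hmax
      · -- i is minimal: line.find(word) hits exactly i
        obtain ⟨h0, hle, hat⟩ := pv_find_facts cs wv.1 i hpre (pv_words_ne_nil wv hw)
        have hidx : (PySem.Chars.find cs wv.1).toNat ∈ pvIdx cs :=
          (pv_mem_idx cs _).mpr (by rw [pv_matchAt_of_prefix hw cs _ hat]; rfl)
        have := hmin _ hidx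
        have heq : PySem.Chars.find cs wv.1 = (i : Int) := by omega
        rw [← heq]
        exact (pv_fold_contains cs pvWORDS hw _).1 h0
      · -- i is maximal: line.rfind(word) hits exactly i
        have hjlen := pv_prefix_le_length hw hpre
        have hge : (i : Int) ≤ PySem.Chars.rfind cs wv.1 :=
          (pv_rfind_go_spec cs wv.1 cs.length).2 i hjlen hpre
        have h0 : 0 ≤ PySem.Chars.rfind cs wv.1 := le_trans (by omega) hge
        obtain ⟨hat, hlen, _⟩ := pv_rfind_spec cs wv.1 h0
        have hidx : (PySem.Chars.rfind cs wv.1).toNat ∈ pvIdx cs :=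
          (pv_mem_idx cs _).mpr (by rw [pv_matchAt_of_prefix hw cs _ hat]; rfl)
        have := hmax _ hidx
        have heq : PySem.Chars.rfind cs wv.1 = (i : Int) := by omega
        rw [← heq]
        exact (pv_fold_contains cs pvWORDS hw _).2 h0

theorem pv_res2_sound (cs : List Char) : pvSound cs (pvRes2 cs) :=
  pv_sound_fold cs pvWORDS (fun _ hx => hx) (pv_base_sound cs)

theorem pv_res2_nodup (cs : List Char) : (pvRes2 cs).keys.Nodup :=
  pv_nodup_fold cs pvWORDS (pv_base_nodup cs)

theorem pv_head?_eq (l : List Nat) (h : l ≠ []) : l.head? = some (l.headD 0) := by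
  cases l with
  | nil => exact absurd rfl h
  | cons x t => rfl

theorem pv_getLast?_eq (l : List Nat) (h : l ≠ []) : l.getLast? = some (l.getLastD 0) := by
  rw [List.getLastD_eq_getLast?]
  rcases hl : l.getLast? with _ | x
  · exact absurd (List.getLast?_eq_none_iff.mp hl) h
  · rfl

theorem pv_val_digit (cs : List Char) (i : Nat)
    (hd : PySem.Chars.isdigit (cs.getD i ' ') = true) : pvVal cs i = pvDVal cs i := by
  simp [pvVal, pv_matchAt_digit cs i hd]

theorem pv_dval_range (cs : List Char) (i : Nat)
    (hd : PySem.Chars.isdigit (cs.getD i ' ') = true) : 0 ≤ pvDVal cs i ∧ pvDVal cs i ≤ 9 := by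
  obtain ⟨h1, h2⟩ := pv_isdigit_bounds _ hd
  unfold pvDVal
  omega

theorem pv_matchAt_of_mem_idx (cs : List Char) {i : Nat} (hi : i ∈ pvIdx cs) :
    pvMatchAt cs i = some (pvVal cs i) := by
  have hs := (pv_mem_idx cs i).mp hi
  rcases h : pvMatchAt cs i with _ | m
  · rw [h] at hs
    cases hs
  · simp [pvVal, h]

-- A's part-2 per-line value
theorem pv_lineA2 (cs : List Char) (hne : pvIdx cs ≠ []) :
    (PySem.Int.ofChars?
      ((pvRes2 cs).getD ((PySem.List.min? (pvRes2 cs).keys (fun k => k)).getD 0) [] ++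
       (pvRes2 cs).getD ((PySem.List.max? (pvRes2 cs).keys (fun k => k)).getD 0) [])).getD 0
      = pvA2 cs := by
  have hc0 : (pvRes2 cs).contains (((pvIdx cs).headD 0 : Nat) : Int) = true :=
    pv_res2_contains cs (pv_headD_mem hne) (Or.inl (pv_head_min (pv_idx_pairwise cs)))
  have hc1 : (pvRes2 cs).contains (((pvIdx cs).getLastD 0 : Nat) : Int) = true :=
    pv_res2_contains cs (pv_getLastD_mem hne) (Or.inr (pv_last_max (pv_idx_pairwise cs)))
  have hmin := pv_min_keys (pvIdx cs) (pv_idx_pairwise cs) (pvRes2 cs).keys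
    (pv_keys_sub cs (pv_res2_sound cs)) ((PySem.Dict.contains_iff_mem_keys _ _).mp hc0)
  have hmax := pv_max_keys (pvIdx cs) (pv_idx_pairwise cs) (pvRes2 cs).keys
    (pv_keys_sub cs (pv_res2_sound cs)) ((PySem.Dict.contains_iff_mem_keys _ _).mp hc1)
  rw [hmin, hmax]
  simp only [Option.getD_some]
  obtain ⟨hv0, _⟩ := pv_getD_sound cs (pv_res2_sound cs) (pv_res2_nodup cs) hc0
  obtain ⟨hv1, _⟩ := pv_getD_sound cs (pv_res2_sound cs) (pv_res2_nodup cs) hc1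
  rw [hv0, hv1]
  have hr0 := pv_matchAt_range cs _ _ (pv_matchAt_of_mem_idx cs (pv_headD_mem hne))
  have hr1 := pv_matchAt_range cs _ _ (pv_matchAt_of_mem_idx cs (pv_getLastD_mem hne))
  rw [pv_two_digit_val _ _ hr0 hr1]
  rfl

-- A's part-1 per-line pieces (the res1 dict is the base digit dict)
theorem pv_base_items_ne (cs : List Char) :
    (⟨pvDps cs 0⟩ : PySem.Dict Int (List Char)).items ≠ [] ↔ pvIdxD cs ≠ [] := by
  show pvDps cs 0 ≠ [] ↔ _
  rw [pv_dps_eq_map]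
  simp

theorem pv_lineA1 (cs : List Char) (hne : pvIdxD cs ≠ []) :
    (PySem.Int.ofChars?
      ((⟨pvDps cs 0⟩ : PySem.Dict Int (List Char)).getD
          ((PySem.List.min? (⟨pvDps cs 0⟩ : PySem.Dict Int (List Char)).keys (fun k => k)).getD 0) [] ++
       (⟨pvDps cs 0⟩ : PySem.Dict Int (List Char)).getD
          ((PySem.List.max? (⟨pvDps cs 0⟩ : PySem.Dict Int (List Char)).keys (fun k => k)).getD 0) [])).getD 0
      = 10 * pvDVal cs ((pvIdxD cs).headD 0) + pvDVal cs ((pvIdxD cs).getLastD 0) := by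
  have hsub : ∀ k ∈ (⟨pvDps cs 0⟩ : PySem.Dict Int (List Char)).keys,
      ∃ i ∈ pvIdxD cs, k = (i : Int) := by
    intro k hk
    rw [pv_base_keys] at hk
    rcases List.mem_map.mp hk with ⟨i, hi, hik⟩
    exact ⟨i, hi, hik.symm⟩
  have hmem0 : (((pvIdxD cs).headD 0 : Nat) : Int) ∈ (⟨pvDps cs 0⟩ : PySem.Dict Int (List Char)).keys := by
    rw [pv_base_keys]
    exact List.mem_map.mpr ⟨_, pv_headD_mem hne, rfl⟩
  have hmem1 : (((pvIdxD cs).getLastD 0 : Nat) : Int) ∈ (⟨pvDps cs 0⟩ : PySem.Dict Int (List Char)).keys := by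
    rw [pv_base_keys]
    exact List.mem_map.mpr ⟨_, pv_getLastD_mem hne, rfl⟩
  have hmin := pv_min_keys (pvIdxD cs) (pv_idxD_pairwise cs) _ hsub hmem0
  have hmax := pv_max_keys (pvIdxD cs) (pv_idxD_pairwise cs) _ hsub hmem1
  rw [hmin, hmax]
  simp only [Option.getD_some]
  have hd0 := (pv_mem_idxD cs _).mp (pv_headD_mem hne)
  have hd1 := (pv_mem_idxD cs _).mp (pv_getLastD_mem hne)
  obtain ⟨hv0, _⟩ := pv_getD_sound cs (pv_base_sound cs) (pv_base_nodup cs)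
    ((PySem.Dict.contains_iff_mem_keys _ _).mpr hmem0)
  obtain ⟨hv1, _⟩ := pv_getD_sound cs (pv_base_sound cs) (pv_base_nodup cs)
    ((PySem.Dict.contains_iff_mem_keys _ _).mpr hmem1)
  rw [hv0, hv1, pv_val_digit cs _ hd0, pv_val_digit cs _ hd1,
    pv_two_digit_val _ _ (pv_dval_range cs _ hd0) (pv_dval_range cs _ hd1)]
  rfl

-- the word loop of the A port is pvRes2
theorem pv_word_fold_eq (cs : List Char) :
    pvNUMBERS.keys.foldl
      (fun (res2 : PySem.Dict Int (List Char)) number =>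
        let i1 := PySem.Chars.find cs number
        let res2 := if 0 ≤ i1 then res2.insert i1 (pvNUMBERS.getD number []) else res2
        let i2 := PySem.Chars.rfind cs number
        if 0 ≤ i2 then res2.insert i2 (pvNUMBERS.getD number []) else res2)
      ⟨pvDps cs 0⟩ = pvRes2 cs := by
  rw [pv_numbers_keys, List.foldl_map]
  rfl

-- the per-line step functions of the two ports, named for the fold proofs
def pvStepAFun : (List Int × List Int) → String → (List Int × List Int) :=
  (fun (acc : List Int × List Int) line =>
      let cs := line.toList
      let st := cs.foldl
        (fun (st : PySem.Dict Int (List Char) × PySem.Dict Int (List Char) × Int) c =>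
          if PySem.Chars.isdigit c then (st.1.insert st.2.2 [c], st.2.1.insert st.2.2 [c], st.2.2 + 1)
          else (st.1, st.2.1, st.2.2 + 1))
        (PySem.Dict.empty, PySem.Dict.empty, 0)
      let res1 := st.1
      let res2 := pvNUMBERS.keys.foldl
        (fun (res2 : PySem.Dict Int (List Char)) number =>
          let i1 := PySem.Chars.find cs number
          let res2 := if 0 ≤ i1 then res2.insert i1 (pvNUMBERS.getD number []) else res2
          let i2 := PySem.Chars.rfind cs number
          if 0 ≤ i2 then res2.insert i2 (pvNUMBERS.getD number []) else res2)
        st.2.1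
      let digits1 :=
        if res1.items ≠ [] then
          acc.1 ++ [(PySem.Int.ofChars?
            (res1.getD ((PySem.List.min? res1.keys (fun k => k)).getD 0) [] ++
             res1.getD ((PySem.List.max? res1.keys (fun k => k)).getD 0) [])).getD 0]
        else acc.1
      let digits2 :=
        acc.2 ++ [(PySem.Int.ofChars?
          (res2.getD ((PySem.List.min? res2.keys (fun k => k)).getD 0) [] ++
           res2.getD ((PySem.List.max? res2.keys (fun k => k)).getD 0) [])).getD 0]
      (digits1, digits2))

def pvStepBFun : (Int × Int) → String → (Int × Int) :=
  (fun (t : Int × Int) line =>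
      let cs := line.toList
      let fs := (PySem.List.enumerate cs).foldl
        (fun (fs : List Int × List Int) ic =>
          if PySem.Chars.isdigit ic.2 then
            (fs.1 ++ [(PySem.Int.ofChars? [ic.2]).getD 0],
             fs.2 ++ [(PySem.Int.ofChars? [ic.2]).getD 0])
          else
            match pvWORDS.find? (fun wv => PySem.Chars.startswith (cs.drop ic.1.toNat) wv.1) with
            | some wv => (fs.1, fs.2 ++ [wv.2])
            | none => (fs.1, fs.2))
        ([], [])
      let t1 := if fs.1 ≠ [] then
          t.1 + 10 * (PySem.List.pyGet? fs.1 0).getD 0 + (PySem.List.pyGet? fs.1 (-1)).getD 0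
        else t.1
      let t2 := t.2 + 10 * (PySem.List.pyGet? fs.2 0).getD 0 + (PySem.List.pyGet? fs.2 (-1)).getD 0
      (t1, t2))

-- per-line step of the A port
theorem pv_stepA_aux (acc : List Int × List Int) (line : String)
    (hl : pvIdx line.toList ≠ []) :
    (fun (acc : List Int × List Int) line =>
      let cs := line.toList
      let st := cs.foldl
        (fun (st : PySem.Dict Int (List Char) × PySem.Dict Int (List Char) × Int) c =>
          if PySem.Chars.isdigit c then (st.1.insert st.2.2 [c], st.2.1.insert st.2.2 [c], st.2.2 + 1)
          else (st.1, st.2.1, st.2.2 + 1))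
        (PySem.Dict.empty, PySem.Dict.empty, 0)
      let res1 := st.1
      let res2 := pvNUMBERS.keys.foldl
        (fun (res2 : PySem.Dict Int (List Char)) number =>
          let i1 := PySem.Chars.find cs number
          let res2 := if 0 ≤ i1 then res2.insert i1 (pvNUMBERS.getD number []) else res2
          let i2 := PySem.Chars.rfind cs number
          if 0 ≤ i2 then res2.insert i2 (pvNUMBERS.getD number []) else res2)
        st.2.1
      let digits1 :=
        if res1.items ≠ [] then
          acc.1 ++ [(PySem.Int.ofChars?
            (res1.getD ((PySem.List.min? res1.keys (fun k => k)).getD 0) [] ++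
             res1.getD ((PySem.List.max? res1.keys (fun k => k)).getD 0) [])).getD 0]
        else acc.1
      let digits2 :=
        acc.2 ++ [(PySem.Int.ofChars?
          (res2.getD ((PySem.List.min? res2.keys (fun k => k)).getD 0) [] ++
           res2.getD ((PySem.List.max? res2.keys (fun k => k)).getD 0) [])).getD 0]
      (digits1, digits2)) acc line
      = (acc.1 ++ pvA1L line.toList, acc.2 ++ [pvA2 line.toList]) := by
  have hempty : ∀ j ∈ (PySem.Dict.empty : PySem.Dict Int (List Char)).keys, j < (0 : Int) := by
    rw [PySem.Dict.keys_empty]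
    intro j hj
    cases hj
  show
    (let st := line.toList.foldl
        (fun (st : PySem.Dict Int (List Char) × PySem.Dict Int (List Char) × Int) c =>
          if PySem.Chars.isdigit c then (st.1.insert st.2.2 [c], st.2.1.insert st.2.2 [c], st.2.2 + 1)
          else (st.1, st.2.1, st.2.2 + 1))
        (PySem.Dict.empty, PySem.Dict.empty, 0)
     let res1 := st.1
     let res2 := pvNUMBERS.keys.foldl
        (fun (res2 : PySem.Dict Int (List Char)) number =>
          let i1 := PySem.Chars.find line.toList number
          let res2 := if 0 ≤ i1 then res2.insert i1 (pvNUMBERS.getD number []) else res2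
          let i2 := PySem.Chars.rfind line.toList number
          if 0 ≤ i2 then res2.insert i2 (pvNUMBERS.getD number []) else res2)
        st.2.1
     let digits1 :=
        if res1.items ≠ [] then
          acc.1 ++ [(PySem.Int.ofChars?
            (res1.getD ((PySem.List.min? res1.keys (fun k => k)).getD 0) [] ++
             res1.getD ((PySem.List.max? res1.keys (fun k => k)).getD 0) [])).getD 0]
        else acc.1
     let digits2 :=
        acc.2 ++ [(PySem.Int.ofChars?
          (res2.getD ((PySem.List.min? res2.keys (fun k => k)).getD 0) [] ++
           res2.getD ((PySem.List.max? res2.keys (fun k => k)).getD 0) [])).getD 0]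
     (digits1, digits2))
      = (acc.1 ++ pvA1L line.toList, acc.2 ++ [pvA2 line.toList])
  rw [pv_digit_fold line.toList PySem.Dict.empty PySem.Dict.empty 0 hempty hempty]
  show
    (let res1 : PySem.Dict Int (List Char) := ⟨pvDps line.toList 0⟩
     let res2 := pvNUMBERS.keys.foldl
        (fun (res2 : PySem.Dict Int (List Char)) number =>
          let i1 := PySem.Chars.find line.toList number
          let res2 := if 0 ≤ i1 then res2.insert i1 (pvNUMBERS.getD number []) else res2
          let i2 := PySem.Chars.rfind line.toList number
          if 0 ≤ i2 then res2.insert i2 (pvNUMBERS.getD number []) else res2)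
        ⟨pvDps line.toList 0⟩
     let digits1 :=
        if res1.items ≠ [] then
          acc.1 ++ [(PySem.Int.ofChars?
            (res1.getD ((PySem.List.min? res1.keys (fun k => k)).getD 0) [] ++
             res1.getD ((PySem.List.max? res1.keys (fun k => k)).getD 0) [])).getD 0]
        else acc.1
     let digits2 :=
        acc.2 ++ [(PySem.Int.ofChars?
          (res2.getD ((PySem.List.min? res2.keys (fun k => k)).getD 0) [] ++
           res2.getD ((PySem.List.max? res2.keys (fun k => k)).getD 0) [])).getD 0]
     (digits1, digits2))
      = (acc.1 ++ pvA1L line.toList, acc.2 ++ [pvA2 line.toList])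
  rw [pv_word_fold_eq line.toList]
  simp only []
  rw [pv_lineA2 line.toList hl]
  by_cases hD : pvIdxD line.toList ≠ []
  · rw [if_pos ((pv_base_items_ne line.toList).mpr hD), pv_lineA1 line.toList hD]
    unfold pvA1L
    rw [if_pos hD]
  · rw [if_neg (fun hcon => hD ((pv_base_items_ne line.toList).mp hcon))]
    unfold pvA1L
    rw [if_neg hD]
    simp

-- per-line step of the B port
theorem pv_stepB_aux (t : Int × Int) (line : String) (hl : pvIdx line.toList ≠ []) :
    (fun (t : Int × Int) line =>
      let cs := line.toList
      let fs := (PySem.List.enumerate cs).foldl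
        (fun (fs : List Int × List Int) ic =>
          if PySem.Chars.isdigit ic.2 then
            (fs.1 ++ [(PySem.Int.ofChars? [ic.2]).getD 0],
             fs.2 ++ [(PySem.Int.ofChars? [ic.2]).getD 0])
          else
            match pvWORDS.find? (fun wv => PySem.Chars.startswith (cs.drop ic.1.toNat) wv.1) with
            | some wv => (fs.1, fs.2 ++ [wv.2])
            | none => (fs.1, fs.2))
        ([], [])
      let t1 := if fs.1 ≠ [] then
          t.1 + 10 * (PySem.List.pyGet? fs.1 0).getD 0 + (PySem.List.pyGet? fs.1 (-1)).getD 0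
        else t.1
      let t2 := t.2 + 10 * (PySem.List.pyGet? fs.2 0).getD 0 + (PySem.List.pyGet? fs.2 (-1)).getD 0
      (t1, t2)) t line
      = (t.1 + (pvA1L line.toList).sum, t.2 + pvA2 line.toList) := by
  show
    (let fs := (PySem.List.enumerate line.toList).foldl
        (fun (fs : List Int × List Int) ic =>
          if PySem.Chars.isdigit ic.2 then
            (fs.1 ++ [(PySem.Int.ofChars? [ic.2]).getD 0],
             fs.2 ++ [(PySem.Int.ofChars? [ic.2]).getD 0])
          else
            match pvWORDS.find? (fun wv => PySem.Chars.startswith (line.toList.drop ic.1.toNat) wv.1) with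
            | some wv => (fs.1, fs.2 ++ [wv.2])
            | none => (fs.1, fs.2))
        ([], [])
     let t1 := if fs.1 ≠ [] then
        t.1 + 10 * (PySem.List.pyGet? fs.1 0).getD 0 + (PySem.List.pyGet? fs.1 (-1)).getD 0
      else t.1
     let t2 := t.2 + 10 * (PySem.List.pyGet? fs.2 0).getD 0 + (PySem.List.pyGet? fs.2 (-1)).getD 0
     (t1, t2))
      = (t.1 + (pvA1L line.toList).sum, t.2 + pvA2 line.toList)
  rw [pv_bscan line.toList [] []]
  simp only [List.nil_append]
  have hne2 : (pvIdx line.toList).map (fun i => pvVal line.toList i) ≠ [] := by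
    simpa using hl
  have h20 : (PySem.List.pyGet? ((pvIdx line.toList).map (fun i => pvVal line.toList i)) 0).getD 0
      = pvVal line.toList ((pvIdx line.toList).headD 0) := by
    rw [pv_pyGet_zero _ hne2, List.head?_map, pv_head?_eq _ hl]
    rfl
  have h21 : (PySem.List.pyGet? ((pvIdx line.toList).map (fun i => pvVal line.toList i)) (-1)).getD 0
      = pvVal line.toList ((pvIdx line.toList).getLastD 0) := by
    rw [pv_pyGet_neg_one _ hne2, List.getLast?_map, pv_getLast?_eq _ hl]
    rfl
  rw [h20, h21]
  by_cases hD : pvIdxD line.toList ≠ []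
  · have hne1 : (pvIdxD line.toList).map (fun i => pvDVal line.toList i) ≠ [] := by
      simpa using hD
    rw [if_pos hne1]
    have h10 : (PySem.List.pyGet? ((pvIdxD line.toList).map (fun i => pvDVal line.toList i)) 0).getD 0
        = pvDVal line.toList ((pvIdxD line.toList).headD 0) := by
      rw [pv_pyGet_zero _ hne1, List.head?_map, pv_head?_eq _ hD]
      rfl
    have h11 : (PySem.List.pyGet? ((pvIdxD line.toList).map (fun i => pvDVal line.toList i)) (-1)).getD 0
        = pvDVal line.toList ((pvIdxD line.toList).getLastD 0) := by
      rw [pv_pyGet_neg_one _ hne1, List.getLast?_map, pv_getLast?_eq _ hD]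
      rfl
    rw [h10, h11]
    unfold pvA1L pvA2
    rw [if_pos hD]
    simp only [List.sum_cons, List.sum_nil, Prod.mk.injEq]
    exact ⟨by ring, by ring⟩
  · push_neg at hD
    have hne1 : ¬ ((pvIdxD line.toList).map (fun i => pvDVal line.toList i) ≠ []) := by
      simp [hD]
    rw [if_neg hne1]
    unfold pvA1L pvA2
    rw [if_neg (by simp [hD])]
    simp only [List.sum_nil, add_zero, Prod.mk.injEq]
    exact ⟨trivial, by ring⟩

theorem pv_stepA (acc : List Int × List Int) (line : String)
    (hl : pvIdx line.toList ≠ []) :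
    pvStepAFun acc line = (acc.1 ++ pvA1L line.toList, acc.2 ++ [pvA2 line.toList]) :=
  pv_stepA_aux acc line hl

theorem pv_stepB (t : Int × Int) (line : String) (hl : pvIdx line.toList ≠ []) :
    pvStepBFun t line = (t.1 + (pvA1L line.toList).sum, t.2 + pvA2 line.toList) :=
  pv_stepB_aux t line hl

-- Pre_ guarantees every line has a match position
theorem pv_words_strings :
    ∀ w ∈ ["one", "two", "three", "four", "five", "six", "seven", "eight", "nine"],
      ∃ wv ∈ pvWORDS, wv.1 = w.toList := by decide

theorem pv_pre_line (line : String)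
    (h : (line.toList.any PySem.Chars.isdigit
      || ["one", "two", "three", "four", "five", "six", "seven", "eight", "nine"].any
           (fun w => PySem.Chars.isIn w.toList line.toList)) = true) :
    pvIdx line.toList ≠ [] := by
  by_cases hdig : line.toList.any PySem.Chars.isdigit = true
  · rcases List.any_eq_true.mp hdig with ⟨c, hc, hdc⟩
    rcases List.mem_iff_getElem.mp hc with ⟨i, hi, hci⟩
    have hgd : line.toList.getD i ' ' = c := by
      rw [List.getD_eq_getElem?_getD, List.getElem?_eq_getElem hi, hci]
      rfl
    apply List.ne_nil_of_mem (a := i)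
    rw [pv_mem_idx]
    rw [pv_matchAt_digit line.toList i (by rw [hgd]; exact hdc)]
    rfl
  · rw [Bool.not_eq_true] at hdig
    rw [hdig, Bool.false_or] at h
    rcases List.any_eq_true.mp h with ⟨w, hwmem, hIn⟩
    rcases pv_words_strings w hwmem with ⟨wv, hwv, hwe⟩
    rcases (PySem.Chars.exists_prefix_drop_iff_isIn w.toList line.toList).mpr hIn with ⟨j, hj⟩
    rw [← hwe] at hj
    apply List.ne_nil_of_mem (a := j)
    rw [pv_mem_idx]
    rw [pv_matchAt_of_prefix hwv line.toList j hj]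
    rfl

-- main fold: the two per-line loops agree, accumulating lists vs. running sums
theorem pv_fold_main (ls : List String) (hls : ∀ line ∈ ls, pvIdx line.toList ≠ [])
    (acc : List Int × List Int) :
    (((ls.foldl pvStepAFun acc).1.sum, (ls.foldl pvStepAFun acc).2.sum) : Int × Int)
      = ls.foldl pvStepBFun (acc.1.sum, acc.2.sum) := by
  induction ls generalizing acc with
  | nil => rfl
  | cons line rest ih =>
    rw [List.foldl_cons, List.foldl_cons,
      pv_stepA acc line (hls line List.mem_cons_self),
      pv_stepB (acc.1.sum, acc.2.sum) line (hls line List.mem_cons_self),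
      ih (fun l hl => hls l (List.mem_cons_of_mem line hl))
        (acc.1 ++ pvA1L line.toList, acc.2 ++ [pvA2 line.toList])]
    congr 1
    simp [List.sum_append]

-- ===== VERDICT (by name: the statement is the Claim_ definition above) =====
theorem solve_spec : Claim_equal_solve := by
  intro puzzle_input _ hpre
  unfold Spec_solve
  show solve puzzle_input = solve_alt puzzle_input
  unfold solve solve_alt
  have hl : ∀ line ∈ puzzle_input, pvIdx line.toList ≠ [] :=
    fun line hline => pv_pre_line line (hpre line hline)
  exact pv_fold_main puzzle_input hl ([], [])
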